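-- pv_equiv track=rewrite | github.com/emmanuelwithme/FLNLP-COLIEE2026 | Legal Case Retrieval/lightgbm/ltr_feature_pipeline.py | _collect_scope_case_ids
-- ===== SOURCE A (Python) =====
-- from typing import Dict, Iterable, List, Mapping, Sequence
--
-- def normalize_case_id(raw_id: object) -> str:
--     case_id = str(raw_id).strip()
--     if case_id.endswith(".txt"):
--         case_id = case_id[:-4]
--     if case_id.isdigit():
--         case_id = case_id.zfill(6)
--     return case_id
--
-- def _collect_scope_case_ids(
--     query_ids: Sequence[str],
--     scope: Mapping[str, Sequence[str]],
--     max_queries: int = 0,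
-- ) -> list[str]:
--     effective_query_ids = list(query_ids[:max_queries]) if max_queries > 0 else list(query_ids)
--     out: list[str] = []
--     seen: set[str] = set()
--
--     for qid in effective_query_ids:
--         norm_qid = normalize_case_id(qid)
--         if norm_qid and norm_qid not in seen:
--             seen.add(norm_qid)
--             out.append(norm_qid)
--
--         candidates = scope.get(norm_qid, scope.get(qid, []))
--         for cid in candidates:
--             norm_cid = normalize_case_id(cid)
--             if norm_cid and norm_cid not in seen:
--                 seen.add(norm_cid)
--                 out.append(norm_cid)
--     return out
-- ===== SOURCE B (Python) =====
-- def normalize_case_id(raw_id: object) -> str: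
--     case_id = str(raw_id).strip()
--     if case_id.endswith(".txt"):
--         case_id = case_id[:-4]
--     if case_id.isdigit():
--         case_id = case_id.zfill(6)
--     return case_id
--
--
-- def _collect_scope_case_ids(query_ids, scope, max_queries=0):
--     # Stage 1: flatten everything into one normalized stream (no dedup bookkeeping).
--     eff = list(query_ids[:max_queries]) if max_queries > 0 else list(query_ids)
--     stream = []
--     for qid in eff:
--         nq = normalize_case_id(qid)
--         if nq:
--             stream.append(nq)
--         for cid in scope.get(nq, scope.get(qid, [])):
--             nc = normalize_case_id(cid)
--             if nc:
--                 stream.append(nc)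
--     # Stage 2: deduplicate by repeatedly emitting the head and filtering out
--     # its later duplicates -- no seen-set / dict is maintained at all.
--     out = []
--     while stream:
--         head = stream[0]
--         out.append(head)
--         stream = [x for x in stream[1:] if x != head]
--     return out
-- ===== Notes on version B (the rewrite author's own statement) =====
-- stated objective: alternative
-- what changed: Replaces A's single interleaved pass with seen-set bookkeeping by a two-stage pipeline: first flatten queries and scope candidates into one normalized stream with no dedup state, then deduplicate by repeatedly emitting the head and filtering out all its later duplicates (a filter-based recursive dedup, maintaining no set or dict at all).
import Mathlib
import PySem

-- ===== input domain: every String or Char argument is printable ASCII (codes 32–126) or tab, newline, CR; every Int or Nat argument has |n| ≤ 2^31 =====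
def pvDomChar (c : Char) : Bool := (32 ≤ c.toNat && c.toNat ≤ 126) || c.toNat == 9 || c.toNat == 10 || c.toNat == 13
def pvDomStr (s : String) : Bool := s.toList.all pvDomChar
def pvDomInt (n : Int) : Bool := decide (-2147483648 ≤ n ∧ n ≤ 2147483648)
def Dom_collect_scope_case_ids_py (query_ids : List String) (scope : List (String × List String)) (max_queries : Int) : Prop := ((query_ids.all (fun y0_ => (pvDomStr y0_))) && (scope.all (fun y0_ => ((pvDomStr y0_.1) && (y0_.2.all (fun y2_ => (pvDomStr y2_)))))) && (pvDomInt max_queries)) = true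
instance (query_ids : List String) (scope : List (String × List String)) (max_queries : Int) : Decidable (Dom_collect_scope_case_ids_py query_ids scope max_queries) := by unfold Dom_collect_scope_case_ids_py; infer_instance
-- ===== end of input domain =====

-- B flattens everything into one normalized stream, then deduplicates it by
-- repeatedly emitting the head and filtering out its later duplicates (no seen-set);
-- objective: alternative decomposition, not faster.

-- ===== PORT A =====
-- normalize_case_id, shared helper of both Pythons (ported once, used by both ports)
def pvNormCase (raw : String) : String :=
  let c := PySem.Str.strip raw
  let c := if PySem.Str.endswith c ".txt" then PySem.Str.slice c none (some (-4)) else c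
  if PySem.Str.strIsdigit c then PySem.Str.zfill c 6 else c

def collect_scope_case_ids_py (query_ids : List String) (scope : List (String × List String)) (max_queries : Int) : List String :=
  let eff := if max_queries > 0 then PySem.List.slice query_ids none (some max_queries) else query_ids
  let d := PySem.Dict.mk scope
  let res := eff.foldl (fun (st : List String × PySem.Set String) qid =>
    let nq := pvNormCase qid
    let st := if nq ≠ "" ∧ ¬ (PySem.Set.contains st.2 nq) then (st.1 ++ [nq], PySem.Set.add st.2 nq) else st
    let cands := (d.get? nq).getD ((d.get? qid).getD [])
    cands.foldl (fun (st : List String × PySem.Set String) cid =>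
      let nc := pvNormCase cid
      if nc ≠ "" ∧ ¬ (PySem.Set.contains st.2 nc) then (st.1 ++ [nc], PySem.Set.add st.2 nc) else st) st)
    ([], PySem.Set.empty)
  res.1

-- ===== PORT B =====
-- Source B's stage-2 while loop: emit the head, drop its later duplicates, recurse on the rest
def pvDedupB : List String → List String
  | [] => []
  | x :: rest => x :: pvDedupB (rest.filter (fun y => y != x))
termination_by l => l.length
decreasing_by
  simpa using Nat.lt_succ_of_le (List.length_filter_le _ _)

def collect_scope_case_ids_py_alt (query_ids : List String) (scope : List (String × List String)) (max_queries : Int) : List String :=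
  let eff := if max_queries > 0 then PySem.List.slice query_ids none (some max_queries) else query_ids
  let d := PySem.Dict.mk scope
  -- stage 1: flatten into one normalized stream (plain appends, no dedup bookkeeping)
  let stream := eff.foldl (fun (acc : List String) qid =>
    let nq := pvNormCase qid
    let acc := if nq ≠ "" then acc ++ [nq] else acc
    ((d.get? nq).getD ((d.get? qid).getD [])).foldl (fun acc cid =>
      let nc := pvNormCase cid
      if nc ≠ "" then acc ++ [nc] else acc) acc) []
  -- stage 2: filter-based dedup
  pvDedupB stream

-- ===== PRECONDITION & SPEC =====
def Spec_collect_scope_case_ids_py (query_ids : List String) (scope : List (String × List String)) (max_queries : Int) (out : List String) : Prop := out = collect_scope_case_ids_py_alt query_ids scope max_queries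
instance (query_ids : List String) (scope : List (String × List String)) (max_queries : Int) (out : List String) : Decidable (Spec_collect_scope_case_ids_py query_ids scope max_queries out) := by unfold Spec_collect_scope_case_ids_py; infer_instance

-- ===== CLAIM (what is proved, stated in full; the proofs are below) =====
def Claim_equal_collect_scope_case_ids_py : Prop := ∀ (query_ids : List String) (scope : List (String × List String)) (max_queries : Int), Dom_collect_scope_case_ids_py query_ids scope max_queries → Spec_collect_scope_case_ids_py query_ids scope max_queries (collect_scope_case_ids_py query_ids scope max_queries)

-- ===== LEMMAS AND PROOFS =====
-- the conditional emit performed by A's seen-set loop, on a state (v, v)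
def pvE (v : List String) (x : String) : List String :=
  if x = "" then v else PySem.Set.add v x

theorem pvPairStep (v : List String) (x : String) :
    (if x ≠ "" ∧ ¬ (PySem.Set.contains v x) then (v ++ [x], PySem.Set.add v x) else (v, v))
      = (pvE v x, pvE v x) := by
  simp only [pvE, PySem.Set.add, PySem.Set.contains]
  split_ifs with h1 h2 h3 <;> simp_all

theorem pvE_eq_foldl_opt (v : List String) (x : String) :
    pvE v x = (if x ≠ "" then [x] else []).foldl PySem.Set.add v := by
  by_cases h : x = "" <;> simp [pvE, h]

theorem pvInner (cands : List String) : ∀ (v : List String),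
    cands.foldl (fun (st : List String × PySem.Set String) cid =>
        let nc := pvNormCase cid
        if nc ≠ "" ∧ ¬ (PySem.Set.contains st.2 nc) then (st.1 ++ [nc], PySem.Set.add st.2 nc) else st)
      (v, v)
      = (let w := (cands.filterMap (fun cid => let nc := pvNormCase cid; if nc ≠ "" then some nc else none)).foldl PySem.Set.add v
         (w, w)) := by
  induction cands with
  | nil => intro v; rfl
  | cons c rest ih =>
    intro v
    simp only [List.foldl_cons]
    rw [pvPairStep]
    by_cases h : pvNormCase c = ""
    · simp only [List.filterMap_cons, pvE, h, ne_eq, not_true_eq_false, ite_false, ite_true]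
      exact ih v
    · simp only [List.filterMap_cons, pvE, h, ne_eq, not_false_eq_true, ite_true, ite_false,
        List.foldl_cons]
      exact ih _

-- A's interleaved loop equals foldl Set.add over the flattened normalized stream
theorem pvMain (c : String → String → List String) (eff : List String) : ∀ (o : List String),
    eff.foldl (fun (st : List String × PySem.Set String) qid =>
        let nq := pvNormCase qid
        let st := if nq ≠ "" ∧ ¬ (PySem.Set.contains st.2 nq) then (st.1 ++ [nq], PySem.Set.add st.2 nq) else st
        (c qid nq).foldl (fun (st : List String × PySem.Set String) cid =>
          let nc := pvNormCase cid
          if nc ≠ "" ∧ ¬ (PySem.Set.contains st.2 nc) then (st.1 ++ [nc], PySem.Set.add st.2 nc) else st) st)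
      (o, o)
      = (let w := (eff.flatMap (fun qid =>
            let nq := pvNormCase qid
            (if nq ≠ "" then [nq] else []) ++ (c qid nq).filterMap (fun cid =>
              let nc := pvNormCase cid
              if nc ≠ "" then some nc else none))).foldl PySem.Set.add o
         (w, w)) := by
  induction eff with
  | nil => intro o; rfl
  | cons qid rest ih =>
    intro o
    simp only [List.foldl_cons, List.flatMap_cons, List.foldl_append]
    rw [pvPairStep, pvInner, ih]
    rw [pvE_eq_foldl_opt]

-- B's inner appending loop builds the filterMap of the candidates
theorem pvInnerB (cands : List String) : ∀ (acc : List String),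
    cands.foldl (fun acc cid =>
        let nc := pvNormCase cid
        if nc ≠ "" then acc ++ [nc] else acc) acc
      = acc ++ cands.filterMap (fun cid => let nc := pvNormCase cid; if nc ≠ "" then some nc else none) := by
  induction cands with
  | nil => intro acc; simp
  | cons c rest ih =>
    intro acc
    simp only [List.foldl_cons, List.filterMap_cons]
    by_cases h : pvNormCase c = ""
    · simp only [h, ne_eq, not_true_eq_false, ite_false]
      exact ih acc
    · simp only [ne_eq, h, not_false_eq_true, ite_true]
      rw [ih]
      simp
-- B's whole stage-1 loop builds the flattened normalized stream
theorem pvStream (c : String → String → List String) (eff : List String) : ∀ (acc : List String),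
    eff.foldl (fun (acc : List String) qid =>
        let nq := pvNormCase qid
        let acc := if nq ≠ "" then acc ++ [nq] else acc
        (c qid nq).foldl (fun acc cid =>
          let nc := pvNormCase cid
          if nc ≠ "" then acc ++ [nc] else acc) acc) acc
      = acc ++ eff.flatMap (fun qid =>
            let nq := pvNormCase qid
            (if nq ≠ "" then [nq] else []) ++ (c qid nq).filterMap (fun cid =>
              let nc := pvNormCase cid
              if nc ≠ "" then some nc else none)) := by
  induction eff with
  | nil => intro acc; simp
  | cons qid rest ih =>
    intro acc
    simp only [List.foldl_cons, List.flatMap_cons]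
    rw [pvInnerB, ih]
    by_cases h : pvNormCase qid = "" <;> simp [h]

-- seen-set dedup equals the filter-based dedup
theorem pvDedup_eq (l : List String) : ∀ (acc : List String),
    l.foldl PySem.Set.add acc = acc ++ pvDedupB (l.filter (fun y => !acc.contains y)) := by
  induction l with
  | nil => intro acc; simp [pvDedupB]
  | cons x rest ih =>
    intro acc
    simp only [List.foldl_cons]
    by_cases h : x ∈ acc
    · have hc : PySem.Set.add acc x = acc := by
        simp [PySem.Set.add, PySem.Set.contains, h]
      rw [List.filter_cons, if_neg (by simp [h]), hc]
      exact ih acc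
    · have hc : PySem.Set.add acc x = acc ++ [x] := by
        simp [PySem.Set.add, PySem.Set.contains, h]
      rw [List.filter_cons, if_pos (by simp [h]), hc, ih (acc ++ [x]), pvDedupB,
        List.filter_filter]
      have hp : (fun y => !(acc ++ [x]).contains y) = (fun a => ((a != x) && !acc.contains a)) := by
        funext y
        by_cases hy : y = x <;> by_cases hya : y ∈ acc <;> simp [hy, hya]
      rw [hp]
      simp

-- the whole equivalence, with the candidate lookup abstracted as c
theorem pvCore (c : String → String → List String) (eff : List String) :
    (eff.foldl (fun (st : List String × PySem.Set String) qid =>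
        let nq := pvNormCase qid
        let st := if nq ≠ "" ∧ ¬ (PySem.Set.contains st.2 nq) then (st.1 ++ [nq], PySem.Set.add st.2 nq) else st
        (c qid nq).foldl (fun (st : List String × PySem.Set String) cid =>
          let nc := pvNormCase cid
          if nc ≠ "" ∧ ¬ (PySem.Set.contains st.2 nc) then (st.1 ++ [nc], PySem.Set.add st.2 nc) else st) st)
      ([], PySem.Set.empty)).1
    = pvDedupB (eff.foldl (fun (acc : List String) qid =>
        let nq := pvNormCase qid
        let acc := if nq ≠ "" then acc ++ [nq] else acc
        (c qid nq).foldl (fun acc cid =>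
          let nc := pvNormCase cid
          if nc ≠ "" then acc ++ [nc] else acc) acc) []) := by
  rw [pvStream, List.nil_append]
  have h1 : (eff.foldl (fun (st : List String × PySem.Set String) qid =>
        let nq := pvNormCase qid
        let st := if nq ≠ "" ∧ ¬ (PySem.Set.contains st.2 nq) then (st.1 ++ [nq], PySem.Set.add st.2 nq) else st
        (c qid nq).foldl (fun (st : List String × PySem.Set String) cid =>
          let nc := pvNormCase cid
          if nc ≠ "" ∧ ¬ (PySem.Set.contains st.2 nc) then (st.1 ++ [nc], PySem.Set.add st.2 nc) else st) st)
      ([], PySem.Set.empty)).1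
      = (eff.flatMap (fun qid =>
            let nq := pvNormCase qid
            (if nq ≠ "" then [nq] else []) ++ (c qid nq).filterMap (fun cid =>
              let nc := pvNormCase cid
              if nc ≠ "" then some nc else none))).foldl PySem.Set.add [] :=
    congrArg Prod.fst (pvMain c eff [])
  rw [h1, pvDedup_eq]
  simp

-- ===== VERDICT (by name: the statement is the Claim_ definition above) =====
theorem collect_scope_case_ids_py_spec : Claim_equal_collect_scope_case_ids_py := by
  intro query_ids scope max_queries _
  unfold Spec_collect_scope_case_ids_py collect_scope_case_ids_py collect_scope_case_ids_py_alt
  exact pvCore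
    (fun qid nq => ((PySem.Dict.mk scope).get? nq).getD (((PySem.Dict.mk scope).get? qid).getD []))
    (if max_queries > 0 then PySem.List.slice query_ids none (some max_queries) else query_ids)
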